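-- pv_equiv track=rewrite | github.com/jiwon2121/Algorithm | day3/balloon.py | pang
-- ===== SOURCE A (Python) =====
-- def pang(n, m, arr):
--     max_count = 0
--     delta1 = [-1, 0, 1, 0]
--     delta2 = [0, 1, 0, -1]
--
--     for i in range(n):
--         for j in range(m):
--             count = 0
--             count += arr[i][j]
--
--             for d1, d2 in zip(delta1, delta2):
--                 ni = i + d1
--                 nj = j + d2
--                 if (0 <= ni < n) and (0 <= nj <m):
--                     count += arr[ni][nj]
--
--             if max_count < count:
--                 max_count = count
--
--     return max_count
-- ===== SOURCE B (Python) =====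
-- def pang(n, m, arr):
--     if n <= 0 or m <= 0:
--         return 0
--     rows = [r[:m] for r in arr[:n]]
--     zero = [0] * m
--     up = rows[1:] + [zero]
--     down = [zero] + rows[:-1]
--     left = [r[1:] + [0] for r in rows]
--     right = [[0] + r[:-1] for r in rows]
--     def add(g, h):
--         return [[a + b for a, b in zip(x, y)] for x, y in zip(g, h)]
--     total = add(add(add(add(rows, up), down), left), right)
--     best = 0
--     for row in total:
--         for v in row:
--             if best < v:
--                 best = v
--     return best
-- ===== Notes on version B (the rewrite author's own statement) =====
-- stated objective: alternative
-- what changed: B has no per-cell neighbour gathering at all: it builds four whole-grid shifted copies (up/down/left/right) of the cropped grid, sums the five grids elementwise with zip, and then takes the running max over the resulting sum grid; A gathers the four neighbours of each cell inside the cell loop with bounds checks.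
import Mathlib
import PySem

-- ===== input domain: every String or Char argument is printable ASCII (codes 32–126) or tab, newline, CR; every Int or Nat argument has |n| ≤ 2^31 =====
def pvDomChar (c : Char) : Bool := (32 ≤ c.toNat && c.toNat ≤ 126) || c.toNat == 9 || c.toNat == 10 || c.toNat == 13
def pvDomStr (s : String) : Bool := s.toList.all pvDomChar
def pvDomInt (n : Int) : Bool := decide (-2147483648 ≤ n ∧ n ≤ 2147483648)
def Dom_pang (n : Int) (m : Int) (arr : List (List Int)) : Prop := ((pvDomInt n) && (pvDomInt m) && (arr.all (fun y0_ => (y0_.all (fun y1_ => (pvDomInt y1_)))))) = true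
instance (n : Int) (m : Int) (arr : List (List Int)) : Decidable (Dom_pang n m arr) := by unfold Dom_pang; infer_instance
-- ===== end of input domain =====

-- B replaces A's per-cell neighbour gathering by four whole-grid shifted copies summed
-- elementwise, then one running max over the sum grid (objective: alternative algorithmic
-- decomposition; same asymptotic cost).

-- ===== PORT A =====
-- arr[i][j] is indexing that can raise IndexError; Pre_pang excludes exactly those inputs,
-- so pyGetD (total under Pre_) is exact here.
def pang (n : Int) (m : Int) (arr : List (List Int)) : Int :=
  (PySem.List.pyRange 0 n 1).foldl (fun max_count i =>
    (PySem.List.pyRange 0 m 1).foldl (fun max_count j =>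
      let count : Int :=
        ([((-1 : Int), (0 : Int)), (0, 1), (1, 0), (0, -1)]).foldl (fun c d =>
          let ni := i + d.1
          let nj := j + d.2
          if 0 ≤ ni ∧ ni < n ∧ 0 ≤ nj ∧ nj < m then
            c + PySem.List.pyGetD (PySem.List.pyGetD arr ni []) nj 0
          else c)
          (PySem.List.pyGetD (PySem.List.pyGetD arr i []) j 0)
      if max_count < count then count else max_count) max_count) 0

-- ===== PORT B =====
-- In the n, m > 0 branch, arr[:n] = take n.toNat and r[:m] = take m.toNat exactly;
-- rows[1:] = drop 1, rows[:-1] = dropLast, zipped elementwise addition = zipWith (·+·).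
-- Source B's local names rows/zero/up/down/left/right/add/total become the helper defs below.
def bRows (n m : Int) (arr : List (List Int)) : List (List Int) :=
  (arr.take n.toNat).map (fun r => r.take m.toNat)
def bZero (m : Int) : List Int := List.replicate m.toNat 0
def bUp (n m : Int) (arr : List (List Int)) : List (List Int) :=
  (bRows n m arr).drop 1 ++ [bZero m]
def bDown (n m : Int) (arr : List (List Int)) : List (List Int) :=
  bZero m :: (bRows n m arr).dropLast
def bLeft (n m : Int) (arr : List (List Int)) : List (List Int) :=
  (bRows n m arr).map (fun r => r.drop 1 ++ [0])
def bRight (n m : Int) (arr : List (List Int)) : List (List Int) :=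
  (bRows n m arr).map (fun r => 0 :: r.dropLast)
def bAdd (g h : List (List Int)) : List (List Int) :=
  List.zipWith (fun x y => List.zipWith (· + ·) x y) g h
def bTotal (n m : Int) (arr : List (List Int)) : List (List Int) :=
  bAdd (bAdd (bAdd (bAdd (bRows n m arr) (bUp n m arr)) (bDown n m arr)) (bLeft n m arr)) (bRight n m arr)

def pang_alt (n : Int) (m : Int) (arr : List (List Int)) : Int :=
  if n ≤ 0 ∨ m ≤ 0 then 0
  else
    (bTotal n m arr).foldl (fun best row =>
      row.foldl (fun b v => if b < v then v else b) best) 0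

-- ===== PRECONDITION & SPEC =====
-- Pre_pang is exactly where A returns: either a loop is empty, or every visited index is in range.
def Pre_pang (n : Int) (m : Int) (arr : List (List Int)) : Prop :=
  n ≤ 0 ∨ m ≤ 0 ∨ (n ≤ (arr.length : Int) ∧ ∀ r ∈ arr.take n.toNat, m ≤ (r.length : Int))
instance (n : Int) (m : Int) (arr : List (List Int)) : Decidable (Pre_pang n m arr) := by
  unfold Pre_pang; infer_instance

def pvWitness_pang : Int × Int × List (List Int) := (2, 3, [[1, 2, 3], [4, -5, 6]])

def Spec_pang (n : Int) (m : Int) (arr : List (List Int)) (out : Int) : Prop := out = pang_alt n m arr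
instance (n : Int) (m : Int) (arr : List (List Int)) (out : Int) : Decidable (Spec_pang n m arr out) := by unfold Spec_pang; infer_instance

-- ===== CLAIM (what is proved, stated in full; the proofs are below) =====
def Claim_equal_pang : Prop := ∀ (n : Int) (m : Int) (arr : List (List Int)), Dom_pang n m arr → Pre_pang n m arr → Spec_pang n m arr (pang n m arr)

-- ===== LEMMAS AND PROOFS =====

-- the plus-shaped sum both programs compute at cell (i, j), written over arr directly
def cellB (n m : Int) (arr : List (List Int)) (i j : Nat) : Int :=
  (arr.getD i []).getD j 0
  + (if i + 1 < n.toNat then (arr.getD (i+1) []).getD j 0 else 0)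
  + (if 1 ≤ i then (arr.getD (i-1) []).getD j 0 else 0)
  + (if j + 1 < m.toNat then (arr.getD i []).getD (j+1) 0 else 0)
  + (if 1 ≤ j then (arr.getD i []).getD (j-1) 0 else 0)

theorem if_lt_eq_max (a b : Int) : (if a < b then b else a) = max a b := by
  rcases lt_or_ge a b with h | h
  · simp [h, max_eq_right h.le]
  · simp [not_lt.mpr h, max_eq_left h]

theorem getD_replicate_zero (k y : Nat) : (List.replicate k (0:Int)).getD y 0 = 0 := by
  rw [List.getD_eq_getElem?_getD, List.getElem?_replicate]
  split <;> rfl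

theorem getD_take_of_lt {α : Type} (l : List α) (k i : Nat) (d : α) (h : i < k) :
    (l.take k).getD i d = l.getD i d := by
  rw [List.getD_eq_getElem?_getD, List.getD_eq_getElem?_getD, List.getElem?_take]
  simp [h]

theorem add_ite_zero (c : Prop) [Decidable c] (a v : Int) :
    (if c then a + v else a) = a + (if c then v else 0) := by split <;> simp

theorem foldl_const {α β : Type} (l : List α) (a : β) : l.foldl (fun s _ => s) a = a := by
  induction l generalizing a with
  | nil => rfl
  | cons x t ih => exact ih a

-- a grid with known lengths and entries is the corresponding range-map grid
theorem grid_ext (L M : Nat) (g : List (List Int)) (f : Nat → Nat → Int)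
    (hL : g.length = L) (hrow : ∀ i, i < L → (g.getD i []).length = M)
    (hf : ∀ i, i < L → ∀ j, j < M → (g.getD i []).getD j 0 = f i j) :
    g = (List.range L).map (fun i => (List.range M).map (f i)) := by
  apply List.ext_getElem
  · simp [hL]
  · intro i h1 h2
    have hi : i < L := by simpa [hL] using h1
    have hgi : g[i] = g.getD i [] := (List.getD_eq_getElem g [] (by omega)).symm
    simp only [List.getElem_map, List.getElem_range]
    rw [hgi]
    apply List.ext_getElem
    · simp only [List.length_map, List.length_range]; exact hrow i hi
    · intro j h3 h4
      have hj : j < M := hrow i hi ▸ h3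
      have : (g.getD i [])[j] = (g.getD i []).getD j 0 :=
        (List.getD_eq_getElem _ 0 (by omega)).symm
      simp only [List.getElem_map, List.getElem_range]
      rw [this, hf i hi j hj]

-- A's per-cell fold equals cellB
theorem cellA_eq_cellB (n m : Int) (arr : List (List Int)) (hn : 0 < n) (hm : 0 < m)
    (i j : Nat) (hi : i < n.toNat) (hj : j < m.toNat) :
    (([((-1 : Int), (0 : Int)), (0, 1), (1, 0), (0, -1)]).foldl (fun c d =>
        let ni := (i : Int) + d.1
        let nj := (j : Int) + d.2
        if 0 ≤ ni ∧ ni < n ∧ 0 ≤ nj ∧ nj < m then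
          c + PySem.List.pyGetD (PySem.List.pyGetD arr ni []) nj 0
        else c)
        (PySem.List.pyGetD (PySem.List.pyGetD arr (i : Int) []) (j : Int) 0)) =
    cellB n m arr i j := by
  simp only [List.foldl_cons, List.foldl_nil, add_ite_zero]
  rw [show ((i:Int) + 0) = ((i:Nat):Int) by omega, show ((j:Int) + 0) = ((j:Nat):Int) by omega]
  simp only [PySem.List.pyGetD_natCast]
  have S1 : (if 0 ≤ (i:Int) + -1 ∧ (i:Int) + -1 < n ∧ 0 ≤ (j:Int) ∧ (j:Int) < m then
        (PySem.List.pyGetD arr ((i:Int) + -1) []).getD j 0 else 0)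
      = (if 1 ≤ i then (arr.getD (i-1) []).getD j 0 else 0) := by
    by_cases h : 1 ≤ i
    · rw [if_pos (by omega), if_pos h, show ((i:Int) + -1) = (((i-1 : Nat)):Int) by omega,
          PySem.List.pyGetD_natCast]
    · rw [if_neg (by omega), if_neg h]
  have S2 : (if 0 ≤ (i:Int) ∧ (i:Int) < n ∧ 0 ≤ (j:Int) + 1 ∧ (j:Int) + 1 < m then
        PySem.List.pyGetD (arr.getD i []) ((j:Int) + 1) 0 else 0)
      = (if j+1 < m.toNat then (arr.getD i []).getD (j+1) 0 else 0) := by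
    by_cases h : j+1 < m.toNat
    · rw [if_pos (by omega), if_pos h, show ((j:Int) + 1) = (((j+1 : Nat)):Int) by omega,
          PySem.List.pyGetD_natCast]
    · rw [if_neg (by omega), if_neg h]
  have S3 : (if 0 ≤ (i:Int) + 1 ∧ (i:Int) + 1 < n ∧ 0 ≤ (j:Int) ∧ (j:Int) < m then
        (PySem.List.pyGetD arr ((i:Int) + 1) []).getD j 0 else 0)
      = (if i+1 < n.toNat then (arr.getD (i+1) []).getD j 0 else 0) := by
    by_cases h : i+1 < n.toNat
    · rw [if_pos (by omega), if_pos h, show ((i:Int) + 1) = (((i+1 : Nat)):Int) by omega,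
          PySem.List.pyGetD_natCast]
    · rw [if_neg (by omega), if_neg h]
  have S4 : (if 0 ≤ (i:Int) ∧ (i:Int) < n ∧ 0 ≤ (j:Int) + -1 ∧ (j:Int) + -1 < m then
        PySem.List.pyGetD (arr.getD i []) ((j:Int) + -1) 0 else 0)
      = (if 1 ≤ j then (arr.getD i []).getD (j-1) 0 else 0) := by
    by_cases h : 1 ≤ j
    · rw [if_pos (by omega), if_pos h, show ((j:Int) + -1) = (((j-1 : Nat)):Int) by omega,
          PySem.List.pyGetD_natCast]
    · rw [if_neg (by omega), if_neg h]
  rw [S1, S2, S3, S4]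
  unfold cellB
  ring

def Rrow (m : Int) (arr : List (List Int)) (i : Nat) : List Int :=
  (arr.getD i []).take m.toNat

theorem getD_zipAdd (x y : List Int) (j : Nat) (hx : j < x.length) (hy : j < y.length) :
    (List.zipWith (· + ·) x y).getD j 0 = x.getD j 0 + y.getD j 0 := by
  have h : j < (List.zipWith (· + ·) x y).length := by simp [List.length_zipWith]; omega
  rw [List.getD_eq_getElem _ _ h, List.getElem_zipWith,
      List.getD_eq_getElem _ _ hx, List.getD_eq_getElem _ _ hy]

theorem getD_bAdd (g h : List (List Int)) (i : Nat) (hg : i < g.length) (hh : i < h.length) :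
    (bAdd g h).getD i [] = List.zipWith (· + ·) (g.getD i []) (h.getD i []) := by
  unfold bAdd
  have hb : i < (List.zipWith (fun x y => List.zipWith (· + ·) x y) g h).length := by
    simp [List.length_zipWith]; omega
  rw [List.getD_eq_getElem _ _ hb, List.getElem_zipWith,
      List.getD_eq_getElem _ _ hg, List.getD_eq_getElem _ _ hh]

theorem total_eq (n m : Int) (arr : List (List Int))
    (hn : 1 ≤ n.toNat) (hm : 1 ≤ m.toNat) (hlen : n.toNat ≤ arr.length)
    (hrl : ∀ i, i < n.toNat → m.toNat ≤ (arr.getD i []).length) :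
    bTotal n m arr =
      (List.range n.toNat).map (fun i => (List.range m.toNat).map (cellB n m arr i)) := by
  have hRlen : ∀ i, i < n.toNat → (Rrow m arr i).length = m.toNat := by
    intro i hi; have := hrl i hi; simp only [Rrow, List.length_take]; omega
  have hRget : ∀ i, i < n.toNat → ∀ j, j < m.toNat →
      (Rrow m arr i).getD j 0 = (arr.getD i []).getD j 0 := by
    intro i _ j hj; exact getD_take_of_lt _ _ _ _ hj
  have hrows_len : (bRows n m arr).length = n.toNat := by simp [bRows]; omega
  have hrows_getD : ∀ i, i < n.toNat → (bRows n m arr).getD i [] = Rrow m arr i := by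
    intro i hi
    unfold bRows Rrow
    rw [List.getD_eq_getElem?_getD, List.getElem?_map, List.getElem?_take]
    simp only [hi, if_pos]
    rw [List.getElem?_eq_getElem (by omega : i < arr.length)]
    simp only [Option.map_some, Option.getD_some, List.getD_eq_getElem?_getD,
      List.getElem?_eq_getElem (by omega : i < arr.length)]
  have hup_len : (bUp n m arr).length = n.toNat := by
    simp [bUp, hrows_len]; omega
  have hup_getD : ∀ i, i < n.toNat →
      (bUp n m arr).getD i [] = if i + 1 < n.toNat then Rrow m arr (i+1) else bZero m := by
    intro i hi
    unfold bUp
    by_cases h : i + 1 < n.toNat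
    · rw [if_pos h, List.getD_eq_getElem?_getD,
          List.getElem?_append_left (by simp [hrows_len]; omega),
          List.getElem?_drop, ← List.getD_eq_getElem?_getD,
          show 1 + i = i + 1 by omega, hrows_getD (i+1) h]
    · rw [if_neg h, List.getD_eq_getElem?_getD,
          List.getElem?_append_right (by simp [hrows_len]; omega)]
      have : i - ((bRows n m arr).drop 1).length = 0 := by simp [hrows_len]; omega
      rw [this]; rfl
  have hdown_len : (bDown n m arr).length = n.toNat := by
    simp [bDown, hrows_len]; omega
  have hdown_getD : ∀ i, i < n.toNat →
      (bDown n m arr).getD i [] = if i = 0 then bZero m else Rrow m arr (i-1) := by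
    intro i hi
    unfold bDown
    rcases i with _ | i'
    · simp
    · rw [List.getD_cons_succ, if_neg (by omega), List.dropLast_eq_take,
          getD_take_of_lt _ _ _ _ (by rw [hrows_len]; omega),
          hrows_getD i' (by omega)]
      simp
  have hleft_len : (bLeft n m arr).length = n.toNat := by simp [bLeft, hrows_len]
  have hleft_getD : ∀ i, i < n.toNat →
      (bLeft n m arr).getD i [] = (Rrow m arr i).drop 1 ++ [0] := by
    intro i hi
    unfold bLeft
    rw [List.getD_eq_getElem?_getD, List.getElem?_map,
        List.getElem?_eq_getElem (by rw [hrows_len]; omega),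
        ← List.getD_eq_getElem (d := []) _ (by rw [hrows_len]; omega), hrows_getD i hi]
    rfl
  have hright_len : (bRight n m arr).length = n.toNat := by simp [bRight, hrows_len]
  have hright_getD : ∀ i, i < n.toNat →
      (bRight n m arr).getD i [] = 0 :: (Rrow m arr i).dropLast := by
    intro i hi
    unfold bRight
    rw [List.getD_eq_getElem?_getD, List.getElem?_map,
        List.getElem?_eq_getElem (by rw [hrows_len]; omega),
        ← List.getD_eq_getElem (d := []) _ (by rw [hrows_len]; omega), hrows_getD i hi]
    rfl
  -- per-row lengths of the five grids
  have hzero_len : (bZero m).length = m.toNat := by simp [bZero]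
  have hup_row_len : ∀ i, i < n.toNat → ((bUp n m arr).getD i []).length = m.toNat := by
    intro i hi; rw [hup_getD i hi]; split
    · exact hRlen _ (by omega)
    · exact hzero_len
  have hdown_row_len : ∀ i, i < n.toNat → ((bDown n m arr).getD i []).length = m.toNat := by
    intro i hi; rw [hdown_getD i hi]; split
    · exact hzero_len
    · exact hRlen _ (by omega)
  have hleft_row_len : ∀ i, i < n.toNat → ((bLeft n m arr).getD i []).length = m.toNat := by
    intro i hi; rw [hleft_getD i hi]
    simp [hRlen i hi]; omega
  have hright_row_len : ∀ i, i < n.toNat → ((bRight n m arr).getD i []).length = m.toNat := by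
    intro i hi; rw [hright_getD i hi]
    have h1 : ((Rrow m arr i).dropLast).length = m.toNat - 1 := by simp [hRlen i hi]
    simp [h1]; omega
  have hrows_row_len : ∀ i, i < n.toNat → ((bRows n m arr).getD i []).length = m.toNat := by
    intro i hi; rw [hrows_getD i hi]; exact hRlen i hi
  -- per-cell entries of the five grids
  have hup_entry : ∀ i, i < n.toNat → ∀ j, j < m.toNat →
      ((bUp n m arr).getD i []).getD j 0 =
        if i + 1 < n.toNat then (arr.getD (i+1) []).getD j 0 else 0 := by
    intro i hi j hj; rw [hup_getD i hi]
    by_cases h : i + 1 < n.toNat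
    · rw [if_pos h, if_pos h, hRget (i+1) h j hj]
    · rw [if_neg h, if_neg h]; unfold bZero; exact getD_replicate_zero _ _
  have hdown_entry : ∀ i, i < n.toNat → ∀ j, j < m.toNat →
      ((bDown n m arr).getD i []).getD j 0 =
        if 1 ≤ i then (arr.getD (i-1) []).getD j 0 else 0 := by
    intro i hi j hj; rw [hdown_getD i hi]
    by_cases h : i = 0
    · rw [if_pos h, if_neg (by omega)]; unfold bZero; exact getD_replicate_zero _ _
    · rw [if_neg h, if_pos (by omega), hRget (i-1) (by omega) j hj]
  have hleft_entry : ∀ i, i < n.toNat → ∀ j, j < m.toNat →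
      ((bLeft n m arr).getD i []).getD j 0 =
        if j + 1 < m.toNat then (arr.getD i []).getD (j+1) 0 else 0 := by
    intro i hi j hj; rw [hleft_getD i hi]
    by_cases h : j + 1 < m.toNat
    · rw [if_pos h, List.getD_eq_getElem?_getD,
          List.getElem?_append_left (by simp [hRlen i hi]; omega),
          List.getElem?_drop, ← List.getD_eq_getElem?_getD,
          show 1 + j = j + 1 by omega, hRget i hi (j+1) h]
    · rw [if_neg h, List.getD_eq_getElem?_getD,
          List.getElem?_append_right (by simp [hRlen i hi]; omega)]
      have : j - ((Rrow m arr i).drop 1).length = 0 := by simp [hRlen i hi]; omega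
      rw [this]; rfl
  have hright_entry : ∀ i, i < n.toNat → ∀ j, j < m.toNat →
      ((bRight n m arr).getD i []).getD j 0 =
        if 1 ≤ j then (arr.getD i []).getD (j-1) 0 else 0 := by
    intro i hi j hj; rw [hright_getD i hi]
    rcases j with _ | j'
    · simp
    · rw [List.getD_cons_succ, if_pos (by omega), List.dropLast_eq_take,
          getD_take_of_lt _ _ _ _ (by rw [hRlen i hi]; omega),
          hRget i hi j' (by omega)]
      simp
  have hrows_entry : ∀ i, i < n.toNat → ∀ j, j < m.toNat →
      ((bRows n m arr).getD i []).getD j 0 = (arr.getD i []).getD j 0 := by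
    intro i hi j hj; rw [hrows_getD i hi]; exact hRget i hi j hj
  -- assemble
  have h1len : (bAdd (bRows n m arr) (bUp n m arr)).length = n.toNat := by
    unfold bAdd; simp [List.length_zipWith, hrows_len, hup_len]
  have h2len : (bAdd (bAdd (bRows n m arr) (bUp n m arr)) (bDown n m arr)).length = n.toNat := by
    unfold bAdd; simp [List.length_zipWith, hrows_len, hup_len, hdown_len]
  have h3len : (bAdd (bAdd (bAdd (bRows n m arr) (bUp n m arr)) (bDown n m arr)) (bLeft n m arr)).length = n.toNat := by
    unfold bAdd; simp [List.length_zipWith, hrows_len, hup_len, hdown_len, hleft_len]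
  apply grid_ext
  · unfold bTotal bAdd
    simp [List.length_zipWith, hrows_len, hup_len, hdown_len, hleft_len, hright_len]
  · intro i hi
    unfold bTotal
    rw [getD_bAdd _ _ _ (by omega) (by omega),
        getD_bAdd _ _ _ (by omega) (by omega),
        getD_bAdd _ _ _ (by omega) (by omega),
        getD_bAdd _ _ _ (by omega) (by omega)]
    simp only [List.length_zipWith, hrows_row_len i hi, hup_row_len i hi, hdown_row_len i hi,
          hleft_row_len i hi, hright_row_len i hi]
    omega
  · intro i hi j hj
    unfold bTotal
    rw [getD_bAdd _ _ _ (by omega) (by omega),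
        getD_bAdd _ _ _ (by omega) (by omega),
        getD_bAdd _ _ _ (by omega) (by omega),
        getD_bAdd _ _ _ (by omega) (by omega)]
    rw [getD_zipAdd _ _ _ (by simp only [List.length_zipWith, hrows_row_len i hi, hup_row_len i hi, hdown_row_len i hi, hleft_row_len i hi]; omega) (by rw [hright_row_len i hi]; exact hj),
        getD_zipAdd _ _ _ (by simp only [List.length_zipWith, hrows_row_len i hi, hup_row_len i hi, hdown_row_len i hi]; omega) (by rw [hleft_row_len i hi]; exact hj),
        getD_zipAdd _ _ _ (by simp only [List.length_zipWith, hrows_row_len i hi, hup_row_len i hi]; omega) (by rw [hdown_row_len i hi]; exact hj),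
        getD_zipAdd _ _ _ (by rw [hrows_row_len i hi]; exact hj) (by rw [hup_row_len i hi]; exact hj)]
    rw [hrows_entry i hi j hj, hup_entry i hi j hj, hdown_entry i hi j hj,
        hleft_entry i hi j hj, hright_entry i hi j hj]
    rfl

theorem pang_eq_core (n m : Int) (arr : List (List Int)) (hn : 0 < n) (hm : 0 < m)
    (hlen : n ≤ (arr.length : Int)) (hrows : ∀ r ∈ arr.take n.toNat, m ≤ (r.length : Int)) :
    pang n m arr = pang_alt n m arr := by
  have hrl : ∀ i, i < n.toNat → m.toNat ≤ (arr.getD i []).length := by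
    intro i hi
    have hi' : i < arr.length := by omega
    have hmem : arr[i] ∈ arr.take n.toNat := by
      have he : (arr.take n.toNat)[i]'(by simp; omega) = arr[i] := List.getElem_take
      exact he ▸ List.getElem_mem _
    have h2 := hrows _ hmem
    have h3 : arr.getD i [] = arr[i] := by
      rw [List.getD_eq_getElem?_getD, List.getElem?_eq_getElem hi']; rfl
    rw [h3]
    omega
  unfold pang pang_alt
  rw [if_neg (by omega)]
  rw [total_eq n m arr (by omega) (by omega) (by omega) hrl]
  rw [PySem.List.pyRange_one 0 n, PySem.List.pyRange_one 0 m]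
  simp only [List.foldl_map, zero_add, Int.sub_zero, if_lt_eq_max]
  apply PySem.List.foldl_congr_mem
  intro acc i hi
  apply PySem.List.foldl_congr_mem
  intro acc2 j hj
  rw [List.mem_range] at hi hj
  rw [cellA_eq_cellB n m arr hn hm i j hi hj]

-- ===== VERDICT (by name: the statement is the Claim_ definition above) =====
theorem pang_spec : Claim_equal_pang := by
  intro n m arr _ hpre
  unfold Spec_pang
  by_cases h0 : n ≤ 0 ∨ m ≤ 0
  · have hA : pang n m arr = 0 := by
      unfold pang
      rcases h0 with h | h
      · rw [PySem.List.pyRange_one_eq_nil (a := 0) (b := n) (by omega)]; rfl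
      · rw [PySem.List.pyRange_one_eq_nil (a := 0) (b := m) (by omega)]
        simp only [List.foldl_nil]
        exact foldl_const _ _
    have hB : pang_alt n m arr = 0 := by unfold pang_alt; rw [if_pos h0]
    rw [hA, hB]
  · rw [not_or, not_le, not_le] at h0
    rcases hpre with h | h | h
    · omega
    · omega
    · exact pang_eq_core n m arr (by omega) (by omega) h.1 h.2
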